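-- pv_equiv track=rewrite | github.com/spaceVoyagerSohaib/catalog_research_agent | evaluations.py | _bucketize_nonzero
-- ===== SOURCE A (Python) =====
-- from typing import Dict, List, Optional, Tuple
--
-- def _bucketize_nonzero(values: List[int]) -> Dict[str, int]:
--     buckets = {
--         '<= 1 day': 0,
--         '<= 3 days': 0,
--         '<= 7 days': 0,
--         '<= 30 days': 0,
--         '<= 90 days': 0,
--         '> 90 days': 0,
--     }
--     for v in values:
--         if v <= 0:
--             continue
--         if v <= 1:
--             buckets['<= 1 day'] += 1
--         elif v <= 3:
--             buckets['<= 3 days'] += 1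
--         elif v <= 7:
--             buckets['<= 7 days'] += 1
--         elif v <= 30:
--             buckets['<= 30 days'] += 1
--         elif v <= 90:
--             buckets['<= 90 days'] += 1
--         else:
--             buckets['> 90 days'] += 1
--     return buckets
-- ===== SOURCE B (Python) =====
-- from typing import Dict, List
--
-- def _bucketize_nonzero(values: List[int]) -> Dict[str, int]:
--     # Staged cumulative counting: count values <= each threshold, then difference.
--     c1 = sum(1 for v in values if 0 < v <= 1)
--     c3 = sum(1 for v in values if 0 < v <= 3)
--     c7 = sum(1 for v in values if 0 < v <= 7)
--     c30 = sum(1 for v in values if 0 < v <= 30)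
--     c90 = sum(1 for v in values if 0 < v <= 90)
--     total = sum(1 for v in values if v > 0)
--     return {
--         '<= 1 day': c1,
--         '<= 3 days': c3 - c1,
--         '<= 7 days': c7 - c3,
--         '<= 30 days': c30 - c7,
--         '<= 90 days': c90 - c30,
--         '> 90 days': total - c90,
--     }
-- ===== Notes on version B (the rewrite author's own statement) =====
-- stated objective: alternative
-- what changed: Replaces A's single pass that classifies each value into one of six buckets via an if/elif ladder with six staged counting passes computing cumulative threshold counts (how many values are <= 1, 3, 7, 30, 90, and positive total), the bucket counts then obtained by differencing adjacent cumulative counts.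
import Mathlib
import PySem

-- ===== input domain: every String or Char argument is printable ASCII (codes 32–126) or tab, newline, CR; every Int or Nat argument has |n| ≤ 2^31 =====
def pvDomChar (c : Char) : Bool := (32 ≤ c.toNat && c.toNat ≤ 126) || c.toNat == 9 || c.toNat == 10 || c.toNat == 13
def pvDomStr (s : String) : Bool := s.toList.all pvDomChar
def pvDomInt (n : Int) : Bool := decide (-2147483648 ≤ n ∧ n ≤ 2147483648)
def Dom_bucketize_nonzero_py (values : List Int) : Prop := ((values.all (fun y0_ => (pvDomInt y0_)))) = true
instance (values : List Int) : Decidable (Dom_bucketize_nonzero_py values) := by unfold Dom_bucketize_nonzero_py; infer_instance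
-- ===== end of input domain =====

-- B trades A's single-pass six-way classification ladder for staged cumulative threshold
-- counts differenced at the end (alternative decomposition, same O(n) cost).


-- ===== PORT A =====
-- loop body of A (buckets[k] += 1 on an always-present key = modify with default 0)
def pvStepA (buckets : PySem.Dict String Int) (v : Int) : PySem.Dict String Int :=
  if v ≤ 0 then buckets
  else if v ≤ 1 then buckets.modify "<= 1 day" 0 (· + 1)
  else if v ≤ 3 then buckets.modify "<= 3 days" 0 (· + 1)
  else if v ≤ 7 then buckets.modify "<= 7 days" 0 (· + 1)
  else if v ≤ 30 then buckets.modify "<= 30 days" 0 (· + 1)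
  else if v ≤ 90 then buckets.modify "<= 90 days" 0 (· + 1)
  else buckets.modify "> 90 days" 0 (· + 1)

def bucketize_nonzero_py (values : List Int) : List (String × Int) :=
  let buckets : PySem.Dict String Int :=
    (((((PySem.Dict.empty.insert "<= 1 day" 0).insert "<= 3 days" 0).insert "<= 7 days" 0).insert
        "<= 30 days" 0).insert "<= 90 days" 0).insert "> 90 days" 0
  (values.foldl pvStepA buckets).items

-- ===== PORT B =====
-- sum(1 for v in values if p v): a generator-sum pass, ported as a fold accumulating an Int
def pvCount (p : Int → Bool) (values : List Int) : Int :=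
  values.foldl (fun acc v => if p v then acc + 1 else acc) 0

def bucketize_nonzero_py_alt (values : List Int) : List (String × Int) :=
  let c1 := pvCount (fun v => 0 < v && v ≤ 1) values
  let c3 := pvCount (fun v => 0 < v && v ≤ 3) values
  let c7 := pvCount (fun v => 0 < v && v ≤ 7) values
  let c30 := pvCount (fun v => 0 < v && v ≤ 30) values
  let c90 := pvCount (fun v => 0 < v && v ≤ 90) values
  let total := pvCount (fun v => 0 < v) values
  [("<= 1 day", c1), ("<= 3 days", c3 - c1), ("<= 7 days", c7 - c3),
   ("<= 30 days", c30 - c7), ("<= 90 days", c90 - c30), ("> 90 days", total - c90)]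

-- ===== PRECONDITION & SPEC =====
def Spec_bucketize_nonzero_py (values : List Int) (out : List (String × Int)) : Prop := out = bucketize_nonzero_py_alt values
instance (values : List Int) (out : List (String × Int)) : Decidable (Spec_bucketize_nonzero_py values out) := by unfold Spec_bucketize_nonzero_py; infer_instance

-- ===== CLAIM (what is proved, stated in full; the proofs are below) =====
def Claim_equal_bucketize_nonzero_py : Prop := ∀ (values : List Int), Dom_bucketize_nonzero_py values → Spec_bucketize_nonzero_py values (bucketize_nonzero_py values)

-- ===== LEMMAS AND PROOFS =====

theorem pvCount_shift (p : Int → Bool) (vs : List Int) :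
    ∀ a : Int, vs.foldl (fun acc v => if p v then acc + 1 else acc) a = a + pvCount p vs := by
  induction vs with
  | nil => intro a; simp [pvCount]
  | cons v vs ih =>
      intro a
      have hc : pvCount p (v :: vs) = (if p v then (0:Int) + 1 else 0) + pvCount p vs := by
        simp only [pvCount, List.foldl_cons]
        exact ih _
      rw [List.foldl_cons, ih, hc]
      split_ifs <;> ring

theorem pvCount_cons (p : Int → Bool) (v : Int) (vs : List Int) :
    pvCount p (v :: vs) = (if p v then 1 else 0) + pvCount p vs := by
  simp only [pvCount, List.foldl_cons]
  by_cases h : p v <;> simp [h, pvCount_shift]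

-- A's fold over the literal six-key dict, characterised by the six counting passes
theorem pos_cons (p : Int → Bool) (v : Int) (vs : List Int) (h : p v = true) :
    pvCount p (v :: vs) = 1 + pvCount p vs := by rw [pvCount_cons, h]; simp

theorem neg_cons (p : Int → Bool) (v : Int) (vs : List Int) (h : p v = false) :
    pvCount p (v :: vs) = pvCount p vs := by rw [pvCount_cons, h]; simp

theorem pvFoldA_char (vs : List Int) :
    ∀ c0 c1 c2 c3 c4 c5 : Int,
      (vs.foldl pvStepA (PySem.Dict.mk [("<= 1 day", c0), ("<= 3 days", c1), ("<= 7 days", c2), ("<= 30 days", c3), ("<= 90 days", c4), ("> 90 days", c5)])).items =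
        [("<= 1 day", c0 + pvCount (fun v => 0 < v && v ≤ 1) vs),
         ("<= 3 days", c1 + pvCount (fun v => 1 < v && v ≤ 3) vs),
         ("<= 7 days", c2 + pvCount (fun v => 3 < v && v ≤ 7) vs),
         ("<= 30 days", c3 + pvCount (fun v => 7 < v && v ≤ 30) vs),
         ("<= 90 days", c4 + pvCount (fun v => 30 < v && v ≤ 90) vs),
         ("> 90 days", c5 + pvCount (fun v => 90 < v) vs)] := by
  induction vs with
  | nil => intro c0 c1 c2 c3 c4 c5; simp [pvCount]
  | cons v vs ih =>
      intro c0 c1 c2 c3 c4 c5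
      rw [List.foldl_cons]
      by_cases h0 : v ≤ 0
      · have st : pvStepA (PySem.Dict.mk [("<= 1 day", c0), ("<= 3 days", c1), ("<= 7 days", c2), ("<= 30 days", c3), ("<= 90 days", c4), ("> 90 days", c5)]) v = PySem.Dict.mk [("<= 1 day", c0), ("<= 3 days", c1), ("<= 7 days", c2), ("<= 30 days", c3), ("<= 90 days", c4), ("> 90 days", c5)] := by
          simp [pvStepA, h0]
        rw [st, ih]
        have e0 : (fun v => 0 < v && v ≤ 1) v = false := by simp; omega
        have e1 : (fun v => 1 < v && v ≤ 3) v = false := by simp; omega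
        have e2 : (fun v => 3 < v && v ≤ 7) v = false := by simp; omega
        have e3 : (fun v => 7 < v && v ≤ 30) v = false := by simp; omega
        have e4 : (fun v => 30 < v && v ≤ 90) v = false := by simp; omega
        have e5 : decide (90 < v) = false := by simp; omega
        rw [neg_cons (fun v => 0 < v && v ≤ 1) v vs e0, neg_cons (fun v => 1 < v && v ≤ 3) v vs e1, neg_cons (fun v => 3 < v && v ≤ 7) v vs e2, neg_cons (fun v => 7 < v && v ≤ 30) v vs e3, neg_cons (fun v => 30 < v && v ≤ 90) v vs e4, neg_cons (fun v => decide (90 < v)) v vs e5]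
      · by_cases h1 : v ≤ 1
        · have st : pvStepA (PySem.Dict.mk [("<= 1 day", c0), ("<= 3 days", c1), ("<= 7 days", c2), ("<= 30 days", c3), ("<= 90 days", c4), ("> 90 days", c5)]) v = PySem.Dict.mk [("<= 1 day", c0 + 1), ("<= 3 days", c1), ("<= 7 days", c2), ("<= 30 days", c3), ("<= 90 days", c4), ("> 90 days", c5)] := by
            simp [pvStepA, h0, h1]; rfl
          rw [st, ih]
          have e0 : (fun v => 0 < v && v ≤ 1) v = true := by simp; omega
          have e1 : (fun v => 1 < v && v ≤ 3) v = false := by simp; omega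
          have e2 : (fun v => 3 < v && v ≤ 7) v = false := by simp; omega
          have e3 : (fun v => 7 < v && v ≤ 30) v = false := by simp; omega
          have e4 : (fun v => 30 < v && v ≤ 90) v = false := by simp; omega
          have e5 : decide (90 < v) = false := by simp; omega
          rw [pos_cons (fun v => 0 < v && v ≤ 1) v vs e0, neg_cons (fun v => 1 < v && v ≤ 3) v vs e1, neg_cons (fun v => 3 < v && v ≤ 7) v vs e2, neg_cons (fun v => 7 < v && v ≤ 30) v vs e3, neg_cons (fun v => 30 < v && v ≤ 90) v vs e4, neg_cons (fun v => decide (90 < v)) v vs e5]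
          simp only [List.cons.injEq, Prod.mk.injEq, and_true, true_and]
          omega
        · by_cases h2 : v ≤ 3
          · have st : pvStepA (PySem.Dict.mk [("<= 1 day", c0), ("<= 3 days", c1), ("<= 7 days", c2), ("<= 30 days", c3), ("<= 90 days", c4), ("> 90 days", c5)]) v = PySem.Dict.mk [("<= 1 day", c0), ("<= 3 days", c1 + 1), ("<= 7 days", c2), ("<= 30 days", c3), ("<= 90 days", c4), ("> 90 days", c5)] := by
              simp [pvStepA, h0, h1, h2]; rfl
            rw [st, ih]
            have e0 : (fun v => 0 < v && v ≤ 1) v = false := by simp; omega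
            have e1 : (fun v => 1 < v && v ≤ 3) v = true := by simp; omega
            have e2 : (fun v => 3 < v && v ≤ 7) v = false := by simp; omega
            have e3 : (fun v => 7 < v && v ≤ 30) v = false := by simp; omega
            have e4 : (fun v => 30 < v && v ≤ 90) v = false := by simp; omega
            have e5 : decide (90 < v) = false := by simp; omega
            rw [neg_cons (fun v => 0 < v && v ≤ 1) v vs e0, pos_cons (fun v => 1 < v && v ≤ 3) v vs e1, neg_cons (fun v => 3 < v && v ≤ 7) v vs e2, neg_cons (fun v => 7 < v && v ≤ 30) v vs e3, neg_cons (fun v => 30 < v && v ≤ 90) v vs e4, neg_cons (fun v => decide (90 < v)) v vs e5]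
            simp only [List.cons.injEq, Prod.mk.injEq, and_true, true_and]
            omega
          · by_cases h3 : v ≤ 7
            · have st : pvStepA (PySem.Dict.mk [("<= 1 day", c0), ("<= 3 days", c1), ("<= 7 days", c2), ("<= 30 days", c3), ("<= 90 days", c4), ("> 90 days", c5)]) v = PySem.Dict.mk [("<= 1 day", c0), ("<= 3 days", c1), ("<= 7 days", c2 + 1), ("<= 30 days", c3), ("<= 90 days", c4), ("> 90 days", c5)] := by
                simp [pvStepA, h0, h1, h2, h3]; rfl
              rw [st, ih]
              have e0 : (fun v => 0 < v && v ≤ 1) v = false := by simp; omega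
              have e1 : (fun v => 1 < v && v ≤ 3) v = false := by simp; omega
              have e2 : (fun v => 3 < v && v ≤ 7) v = true := by simp; omega
              have e3 : (fun v => 7 < v && v ≤ 30) v = false := by simp; omega
              have e4 : (fun v => 30 < v && v ≤ 90) v = false := by simp; omega
              have e5 : decide (90 < v) = false := by simp; omega
              rw [neg_cons (fun v => 0 < v && v ≤ 1) v vs e0, neg_cons (fun v => 1 < v && v ≤ 3) v vs e1, pos_cons (fun v => 3 < v && v ≤ 7) v vs e2, neg_cons (fun v => 7 < v && v ≤ 30) v vs e3, neg_cons (fun v => 30 < v && v ≤ 90) v vs e4, neg_cons (fun v => decide (90 < v)) v vs e5]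
              simp only [List.cons.injEq, Prod.mk.injEq, and_true, true_and]
              omega
            · by_cases h4 : v ≤ 30
              · have st : pvStepA (PySem.Dict.mk [("<= 1 day", c0), ("<= 3 days", c1), ("<= 7 days", c2), ("<= 30 days", c3), ("<= 90 days", c4), ("> 90 days", c5)]) v = PySem.Dict.mk [("<= 1 day", c0), ("<= 3 days", c1), ("<= 7 days", c2), ("<= 30 days", c3 + 1), ("<= 90 days", c4), ("> 90 days", c5)] := by
                  simp [pvStepA, h0, h1, h2, h3, h4]; rfl
                rw [st, ih]
                have e0 : (fun v => 0 < v && v ≤ 1) v = false := by simp; omega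
                have e1 : (fun v => 1 < v && v ≤ 3) v = false := by simp; omega
                have e2 : (fun v => 3 < v && v ≤ 7) v = false := by simp; omega
                have e3 : (fun v => 7 < v && v ≤ 30) v = true := by simp; omega
                have e4 : (fun v => 30 < v && v ≤ 90) v = false := by simp; omega
                have e5 : decide (90 < v) = false := by simp; omega
                rw [neg_cons (fun v => 0 < v && v ≤ 1) v vs e0, neg_cons (fun v => 1 < v && v ≤ 3) v vs e1, neg_cons (fun v => 3 < v && v ≤ 7) v vs e2, pos_cons (fun v => 7 < v && v ≤ 30) v vs e3, neg_cons (fun v => 30 < v && v ≤ 90) v vs e4, neg_cons (fun v => decide (90 < v)) v vs e5]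
                simp only [List.cons.injEq, Prod.mk.injEq, and_true, true_and]
                omega
              · by_cases h5 : v ≤ 90
                · have st : pvStepA (PySem.Dict.mk [("<= 1 day", c0), ("<= 3 days", c1), ("<= 7 days", c2), ("<= 30 days", c3), ("<= 90 days", c4), ("> 90 days", c5)]) v = PySem.Dict.mk [("<= 1 day", c0), ("<= 3 days", c1), ("<= 7 days", c2), ("<= 30 days", c3), ("<= 90 days", c4 + 1), ("> 90 days", c5)] := by
                    simp [pvStepA, h0, h1, h2, h3, h4, h5]; rfl
                  rw [st, ih]
                  have e0 : (fun v => 0 < v && v ≤ 1) v = false := by simp; omega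
                  have e1 : (fun v => 1 < v && v ≤ 3) v = false := by simp; omega
                  have e2 : (fun v => 3 < v && v ≤ 7) v = false := by simp; omega
                  have e3 : (fun v => 7 < v && v ≤ 30) v = false := by simp; omega
                  have e4 : (fun v => 30 < v && v ≤ 90) v = true := by simp; omega
                  have e5 : decide (90 < v) = false := by simp; omega
                  rw [neg_cons (fun v => 0 < v && v ≤ 1) v vs e0, neg_cons (fun v => 1 < v && v ≤ 3) v vs e1, neg_cons (fun v => 3 < v && v ≤ 7) v vs e2, neg_cons (fun v => 7 < v && v ≤ 30) v vs e3, pos_cons (fun v => 30 < v && v ≤ 90) v vs e4, neg_cons (fun v => decide (90 < v)) v vs e5]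
                  simp only [List.cons.injEq, Prod.mk.injEq, and_true, true_and]
                  omega
                · have st : pvStepA (PySem.Dict.mk [("<= 1 day", c0), ("<= 3 days", c1), ("<= 7 days", c2), ("<= 30 days", c3), ("<= 90 days", c4), ("> 90 days", c5)]) v = PySem.Dict.mk [("<= 1 day", c0), ("<= 3 days", c1), ("<= 7 days", c2), ("<= 30 days", c3), ("<= 90 days", c4), ("> 90 days", c5 + 1)] := by
                    simp [pvStepA, h0, h1, h2, h3, h4, h5]; rfl
                  rw [st, ih]
                  have e0 : (fun v => 0 < v && v ≤ 1) v = false := by simp; omega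
                  have e1 : (fun v => 1 < v && v ≤ 3) v = false := by simp; omega
                  have e2 : (fun v => 3 < v && v ≤ 7) v = false := by simp; omega
                  have e3 : (fun v => 7 < v && v ≤ 30) v = false := by simp; omega
                  have e4 : (fun v => 30 < v && v ≤ 90) v = false := by simp; omega
                  have e5 : decide (90 < v) = true := by simp; omega
                  rw [neg_cons (fun v => 0 < v && v ≤ 1) v vs e0, neg_cons (fun v => 1 < v && v ≤ 3) v vs e1, neg_cons (fun v => 3 < v && v ≤ 7) v vs e2, neg_cons (fun v => 7 < v && v ≤ 30) v vs e3, neg_cons (fun v => 30 < v && v ≤ 90) v vs e4, pos_cons (fun v => decide (90 < v)) v vs e5]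
                  simp only [List.cons.injEq, Prod.mk.injEq, and_true, true_and]
                  omega

-- cumulative counts split into adjacent bucket counts
theorem pvCount_split (p q r : Int → Bool)
    (h : ∀ x : Int, (if p x then (1:Int) else 0) = (if q x then 1 else 0) + (if r x then 1 else 0))
    (vs : List Int) : pvCount p vs = pvCount q vs + pvCount r vs := by
  induction vs with
  | nil => simp [pvCount]
  | cons v vs ih => rw [pvCount_cons, pvCount_cons, pvCount_cons, h v]; omega

-- ===== VERDICT (by name: the statement is the Claim_ definition above) =====
theorem bucketize_nonzero_py_spec : Claim_equal_bucketize_nonzero_py := by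
  intro values _
  show bucketize_nonzero_py values = bucketize_nonzero_py_alt values
  unfold bucketize_nonzero_py bucketize_nonzero_py_alt
  have hA := pvFoldA_char values 0 0 0 0 0 0
  have s1 := pvCount_split (fun v => 0 < v && v ≤ 3) (fun v => 0 < v && v ≤ 1)
      (fun v => 1 < v && v ≤ 3) (fun x => by by_cases hx : x ≤ 1 <;> by_cases hy : 0 < x <;> by_cases hz : x ≤ 3 <;> simp_all <;> omega) values
  have s2 := pvCount_split (fun v => 0 < v && v ≤ 7) (fun v => 0 < v && v ≤ 3)
      (fun v => 3 < v && v ≤ 7) (fun x => by by_cases hx : x ≤ 3 <;> by_cases hy : 0 < x <;> by_cases hz : x ≤ 7 <;> simp_all <;> omega) values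
  have s3 := pvCount_split (fun v => 0 < v && v ≤ 30) (fun v => 0 < v && v ≤ 7)
      (fun v => 7 < v && v ≤ 30) (fun x => by by_cases hx : x ≤ 7 <;> by_cases hy : 0 < x <;> by_cases hz : x ≤ 30 <;> simp_all <;> omega) values
  have s4 := pvCount_split (fun v => 0 < v && v ≤ 90) (fun v => 0 < v && v ≤ 30)
      (fun v => 30 < v && v ≤ 90) (fun x => by by_cases hx : x ≤ 30 <;> by_cases hy : 0 < x <;> by_cases hz : x ≤ 90 <;> simp_all <;> omega) values
  have s5 := pvCount_split (fun v => (decide (0 < v))) (fun v => 0 < v && v ≤ 90)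
      (fun v => (decide (90 < v))) (fun x => by by_cases hx : x ≤ 90 <;> by_cases hy : 0 < x <;> simp_all <;> omega) values
  rw [show ((((((PySem.Dict.empty.insert "<= 1 day" (0:Int)).insert "<= 3 days" 0).insert "<= 7 days" 0).insert
        "<= 30 days" 0).insert "<= 90 days" 0).insert "> 90 days" 0) =
      PySem.Dict.mk [("<= 1 day", 0), ("<= 3 days", 0), ("<= 7 days", 0), ("<= 30 days", 0),
        ("<= 90 days", 0), ("> 90 days", 0)] from rfl]
  rw [hA]
  simp only [List.cons.injEq, Prod.mk.injEq, and_true, true_and]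
  refine ⟨by omega, by omega, by omega, by omega, by omega, by omega⟩
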